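-- pv_equiv track=rewrite | github.com/kyY00n/algorithm | python/boj_2877.py | getNthElement
-- ===== SOURCE A (Python) =====
-- def getNthElement(n):
--     if n == 0:
--         return "4"
--     elif n == 1:
--         return "7"
--     else:
--         if n % 2 == 0:
--             return getNthElement(n // 2 - 1) + "4"
--         else:
--             return getNthElement(n - 1) + "7"
-- ===== SOURCE B (Python) =====
-- def getNthElement(n):
--     digits = []
--     while n != 0 and n != 1:
--         if n % 2 == 0:
--             digits.append('4')
--             n = n // 2 - 1
--         else:
--             digits.append('7')
--             n = n - 1
--     digits.append('4' if n == 0 else '7')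
--     return ''.join(reversed(digits))
-- ===== Notes on version B (the rewrite author's own statement) =====
-- stated objective: alternative
-- what changed: Replaced the recursive construction (which builds the string by repeated concatenation on the way back up) with an iterative while-loop that records the suffix digits into a list and joins them reversed at the end.
import Mathlib
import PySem

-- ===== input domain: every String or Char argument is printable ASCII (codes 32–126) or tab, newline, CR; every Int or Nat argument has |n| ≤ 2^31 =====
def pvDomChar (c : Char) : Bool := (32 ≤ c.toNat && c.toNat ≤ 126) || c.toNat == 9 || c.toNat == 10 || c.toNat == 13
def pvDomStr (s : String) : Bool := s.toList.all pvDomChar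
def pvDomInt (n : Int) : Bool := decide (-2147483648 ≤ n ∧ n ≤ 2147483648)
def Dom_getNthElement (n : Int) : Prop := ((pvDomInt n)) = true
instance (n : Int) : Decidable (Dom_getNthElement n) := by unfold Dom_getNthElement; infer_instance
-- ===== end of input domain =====

-- B replaces A's recursion with an iterative digit-accumulating loop joined reversed at the end (alternative decomposition, same cost class).
-- Equivalence is about the RETURN value; neither version mutates its argument.

-- ===== PORT A =====
-- A recurses with n//2-1 (even) / n-1 (odd); on the admitted domain n ≥ 0 both Python's
-- floor-division/mod and the recursion agree with Nat division/mod, so the port recurses on n.toNat.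
-- Exact on Pre_ (0 ≤ n); for n < 0 Python A raises RecursionError (excluded by Pre_).
def getNthElementNat (m : Nat) : String :=
  if m = 0 then "4"
  else if m = 1 then "7"
  else if m % 2 == 0 then getNthElementNat (m / 2 - 1) ++ "4"
  else getNthElementNat (m - 1) ++ "7"
termination_by m
decreasing_by all_goals omega

def getNthElement (n : Int) : String := getNthElementNat n.toNat

-- ===== PORT B =====
-- Literal port of Source B's while-loop: `digits` is the accumulator list, appended at the end;
-- afterwards ''.join(reversed(digits)). Exact on Pre_ (0 ≤ n); for n < 0 Python B loops forever.
def altLoop (m : Nat) (digits : List Char) : List Char :=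
  if m ≠ 0 ∧ m ≠ 1 then
    if m % 2 == 0 then altLoop (m / 2 - 1) (digits ++ ['4'])
    else altLoop (m - 1) (digits ++ ['7'])
  else digits ++ [if m = 0 then '4' else '7']
termination_by m
decreasing_by all_goals omega

def getNthElement_alt (n : Int) : String :=
  String.ofList ((altLoop n.toNat []).reverse)

-- ===== PRECONDITION & SPEC =====
-- Pre_ excludes n < 0, where Python A raises RecursionError (the recursion never reaches a base case).
def Pre_getNthElement (n : Int) : Prop := 0 ≤ n
instance (n : Int) : Decidable (Pre_getNthElement n) := by unfold Pre_getNthElement; infer_instance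
def pvWitness_getNthElement : Int := (5)

def Spec_getNthElement (n : Int) (out : String) : Prop := out = getNthElement_alt n
instance (n : Int) (out : String) : Decidable (Spec_getNthElement n out) := by unfold Spec_getNthElement; infer_instance

-- ===== CLAIM (what is proved, stated in full; the proofs are below) =====
def Claim_equal_getNthElement : Prop := ∀ (n : Int), Dom_getNthElement n → Pre_getNthElement n → Spec_getNthElement n (getNthElement n)

-- ===== LEMMAS AND PROOFS =====

-- Loop invariant: reversing the accumulated digit list yields A's string followed by the reversed accumulator.
theorem altLoop_reverse (m : Nat) : ∀ digits : List Char,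
    (altLoop m digits).reverse = (getNthElementNat m).toList ++ digits.reverse := by
  induction m using Nat.strong_induction_on with
  | _ m ih =>
    intro digits
    rw [altLoop, getNthElementNat]
    by_cases h0 : m = 0
    · simp [h0]
    by_cases h1 : m = 1
    · simp [h1]
    rw [if_neg h0, if_neg h1, if_pos (show m ≠ 0 ∧ m ≠ 1 from ⟨h0, h1⟩)]
    by_cases hp : m % 2 == 0
    · rw [if_pos hp, if_pos hp, ih (m / 2 - 1) (by omega)]
      simp [h0]
    · rw [if_neg hp, if_neg hp, ih (m - 1) (by omega)]
      simp [h0]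

-- ===== VERDICT (by name: the statement is the Claim_ definition above) =====
theorem getNthElement_spec : Claim_equal_getNthElement := by
  intro n _ _
  unfold Spec_getNthElement getNthElement getNthElement_alt
  rw [altLoop_reverse]
  simp
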